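-- pv_equiv track=rewrite | github.com/SadafAsad/Linear-Algebra | permutationMatrixSquareRoot.py | theMatrix
-- ===== SOURCE A (Python) =====
-- def product(list1, list2):
--     n1 = len(list1)
--     n2 = len(list2)
--     n1_index = 0
--     n2_index = 0
--     list3 = list()
--     for i in range(n1+n2):
--         if i%2==0:
--             list3.append(list1[n1_index])
--             n1_index+=1
--         else:
--             list3.append(list2[n2_index])
--             n2_index+=1
--     return list3
--
-- def separateOddEven(cycle_list):
--     odd_cycles = list()
--     even_cycles = list()
--     for cycle in cycle_list:
--         if len(cycle)%2==0:
--             even_cycles.append(cycle)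
--         else:
--             odd_cycles.append(cycle)
--     return (even_cycles, odd_cycles)
--
-- def oddCycleComposition(odd_cycles):
--     ans = list()
--     for cycle in odd_cycles:
--         n = len(cycle)
--         middle = n//2
--         first = list()
--         for i in range(middle+1):
--             first.append(cycle[i])
--         second = list()
--         count = n-middle-1
--         for r in range(count):
--             second.append(cycle[middle+1])
--             middle+=1
--         ans.append(product(first, second))
--     return ans
--
-- def evenCycleComposition(even_cycles):
--     ans = list()
--     n = len(even_cycles)
--     i = 0
--     while i<n:
--         cycle_len = len(even_cycles[i])
--         r = i+1
--         while r<n: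
--             if len(even_cycles[r])==cycle_len:
--                 new_cycle = product(even_cycles[i], even_cycles[r])
--                 ans.append(new_cycle)
--                 even_cycles.pop(r)
--                 even_cycles.pop(i)
--                 n = len(even_cycles)
--                 break
--             r+=1
--         i = 0
--     return ans
--
-- def theMatrix(cycle_list):
--     even_cycles, odd_cycles = separateOddEven(cycle_list)
--     matrix = list()
--     if len(odd_cycles)!=0:
--         f_odd = oddCycleComposition(odd_cycles)
--     else:
--         f_odd = []
--     if len(even_cycles)!=0:
--         f_even = evenCycleComposition(even_cycles)
--     else:
--         f_even = []
--
--     for i in f_odd: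
--         matrix.append(i)
--     for i in f_even:
--         matrix.append(i)
--     return matrix
-- ===== SOURCE B (Python) =====
-- def _interleave(a, b):
--     out = []
--     for x, y in zip(a, b):
--         out.append(x)
--         out.append(y)
--     out.extend(a[len(b):])
--     return out
--
-- def theMatrix(cycle_list):
--     odd_out = []
--     slots = []            # [first_cycle, second_cycle_or_None] in order of first arrival
--     open_ = {}            # even length -> index in slots of its unpaired first cycle
--     for c in cycle_list:
--         m = len(c)
--         if m % 2:
--             h = m // 2 + 1
--             odd_out.append(_interleave(c[:h], c[h:]))
--         elif m in open_:
--             slots[open_.pop(m)][1] = c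
--         else:
--             open_[m] = len(slots)
--             slots.append([c, None])
--     return odd_out + [_interleave(a, b) for a, b in slots if b is not None]
-- ===== Notes on version B (the rewrite author's own statement) =====
-- stated objective: faster
-- what changed: A pairs equal-length even cycles by repeatedly rescanning and popping a mutable list (quadratic in the number of even cycles); B makes one pass over cycle_list, pairing each even cycle with the pending same-length cycle via a dict of open slots and handling odd cycles with a direct split-and-interleave, so no rescan or pop remains. Pre_ excludes inputs where some even cycle length occurs an odd number of times among the even cycles: there A's pairing loop never terminates (theMatrix diverges), while B simply drops the unpaired cycles.
import Mathlib
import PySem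

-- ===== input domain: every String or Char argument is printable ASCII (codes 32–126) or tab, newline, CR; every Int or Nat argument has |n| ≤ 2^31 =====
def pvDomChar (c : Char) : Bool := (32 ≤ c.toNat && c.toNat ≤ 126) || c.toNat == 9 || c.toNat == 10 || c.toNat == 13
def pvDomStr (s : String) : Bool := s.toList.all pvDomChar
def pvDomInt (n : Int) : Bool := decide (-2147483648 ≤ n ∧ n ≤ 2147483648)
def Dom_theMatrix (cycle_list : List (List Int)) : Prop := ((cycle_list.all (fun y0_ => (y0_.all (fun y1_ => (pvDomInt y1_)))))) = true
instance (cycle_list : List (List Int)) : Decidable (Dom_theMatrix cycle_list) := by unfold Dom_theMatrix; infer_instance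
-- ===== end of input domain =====

-- B replaces A's quadratic rescan-and-pop pairing of equal-length even cycles by a single pass
-- with a dict of open slots (objective: faster, one pass instead of nested scans).

-- ===== PORT A =====
-- product: `for i in range(n1+n2)` alternating appends; list indices are always in
-- range at A's call sites, so `getD _ 0` is exact there.
def product (list1 list2 : List Int) : List Int :=
  let n1 := list1.length
  let n2 := list2.length
  ((List.range (n1 + n2)).foldl
    (fun (st : Nat × Nat × List Int) i =>
      if i % 2 == 0 then (st.1 + 1, st.2.1, st.2.2 ++ [list1.getD st.1 0])
      else (st.1, st.2.1 + 1, st.2.2 ++ [list2.getD st.2.1 0]))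
    (0, 0, ([] : List Int))).2.2

def separateOddEven (cycle_list : List (List Int)) : List (List Int) × List (List Int) :=
  cycle_list.foldl
    (fun (st : List (List Int) × List (List Int)) cycle =>
      if cycle.length % 2 == 0 then (st.1 ++ [cycle], st.2) else (st.1, st.2 ++ [cycle]))
    ([], [])

def oddCycleComposition (odd_cycles : List (List Int)) : List (List Int) :=
  odd_cycles.foldl
    (fun ans cycle =>
      let n := cycle.length
      let middle := n / 2
      let first := (List.range (middle + 1)).foldl (fun f i => f ++ [cycle.getD i 0]) []
      let count := n - middle - 1
      let second := ((List.range count).foldl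
          (fun (st : List Int × Nat) _ => (st.1 ++ [cycle.getD (st.2 + 1) 0], st.2 + 1))
          ([], middle)).1
      ans ++ [product first second])
    []

-- the inner `while r<n` scan of evenCycleComposition: find the first later cycle of
-- length len0, return it together with the list with it removed (the two `pop`s)
def extractA (len0 : Nat) : List (List Int) → Option (List Int × List (List Int))
  | [] => none
  | c :: cs =>
    if c.length == len0 then some (c, cs)
    else match extractA len0 cs with
      | some (m, rest) => some (m, c :: rest)
      | none => none

theorem extractA_length {len0 : Nat} : ∀ {cs : List (List Int)} {m rest},
    extractA len0 cs = some (m, rest) → rest.length + 1 = cs.length := by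
  intro cs
  induction cs with
  | nil => intro m rest h; simp [extractA] at h
  | cons c cs ih =>
    intro m rest h
    simp only [extractA] at h
    split at h
    · cases h; rfl
    · cases hx : extractA len0 cs with
      | none => rw [hx] at h; cases h
      | some p =>
        rw [hx] at h
        cases h
        have := ih hx
        simp [List.length_cons]
        omega

-- the outer `while i<n` loop (i is reset to 0 each iteration, so it always works on
-- the front cycle); when no partner exists the Python loop never terminates — that
-- case is outside Pre_theMatrix and the port returns the accumulator there
def evenGo : List (List Int) → List (List Int) → List (List Int)
  | [], ans => ans
  | c :: rest, ans =>
    match h : extractA c.length rest with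
    | some (m, rest') => evenGo rest' (ans ++ [product c m])
    | none => ans
termination_by cs _ => cs.length
decreasing_by
  have := extractA_length h; simp; omega

def evenCycleComposition (even_cycles : List (List Int)) : List (List Int) :=
  evenGo even_cycles []

def theMatrix (cycle_list : List (List Int)) : List (List Int) :=
  let p := separateOddEven cycle_list
  let even_cycles := p.1
  let odd_cycles := p.2
  let f_odd := if odd_cycles.length != 0 then oddCycleComposition odd_cycles else []
  let f_even := if even_cycles.length != 0 then evenCycleComposition even_cycles else []
  f_even.foldl (fun m i => m ++ [i]) (f_odd.foldl (fun m i => m ++ [i]) [])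

-- ===== PORT B =====
def interleaveB (a b : List Int) : List Int :=
  ((a.zip b).foldl (fun out xy => out ++ [xy.1, xy.2]) []) ++ a.drop b.length

-- one loop-body step of Source B: state = (odd_out, slots, open_)
def stepB (st : List (List Int) × List (List Int × Option (List Int)) × PySem.Dict Int Nat)
    (c : List Int) : List (List Int) × List (List Int × Option (List Int)) × PySem.Dict Int Nat :=
  let m := c.length
  if m % 2 == 1 then
    let h := m / 2 + 1
    (st.1 ++ [interleaveB (c.take h) (c.drop h)], st.2.1, st.2.2)
  else
    match st.2.2.get? (m : Int) with
    | some i => (st.1, st.2.1.modify i (fun s => (s.1, some c)), st.2.2.erase (m : Int))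
    | none => (st.1, st.2.1 ++ [(c, none)], st.2.2.insert (m : Int) st.2.1.length)

def theMatrix_alt (cycle_list : List (List Int)) : List (List Int) :=
  let st := cycle_list.foldl stepB ([], [], PySem.Dict.empty)
  st.1 ++ st.2.1.filterMap (fun s => s.2.map (fun b => interleaveB s.1 b))

-- ===== PRECONDITION & SPEC =====
-- Pre_ excludes exactly the inputs on which the Python A never returns: when some even
-- cycle length occurs an odd number of times among the even-length cycles, A's pairing
-- while-loop (which always restarts at i = 0) loops forever.
def Pre_theMatrix (cycle_list : List (List Int)) : Prop :=
  ∀ c ∈ cycle_list, c.length % 2 = 0 →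
    (cycle_list.filter (fun d => d.length == c.length)).length % 2 = 0
instance (cycle_list : List (List Int)) : Decidable (Pre_theMatrix cycle_list) := by
  unfold Pre_theMatrix; infer_instance

def pvWitness_theMatrix : List (List Int) := [[1, 2], [3], [4, 5]]

def Spec_theMatrix (cycle_list : List (List Int)) (out : List (List Int)) : Prop := out = theMatrix_alt cycle_list
instance (cycle_list : List (List Int)) (out : List (List Int)) : Decidable (Spec_theMatrix cycle_list out) := by unfold Spec_theMatrix; infer_instance

-- ===== CLAIM (what is proved, stated in full; the proofs are below) =====
def Claim_equal_theMatrix : Prop := ∀ (cycle_list : List (List Int)), Dom_theMatrix cycle_list → Pre_theMatrix cycle_list → Spec_theMatrix cycle_list (theMatrix cycle_list)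

-- ===== LEMMAS AND PROOFS =====

def ilv : List Int → List Int → List Int
  | a, [] => a
  | [], _ :: _ => []
  | x :: a, y :: b => x :: y :: ilv a b

theorem zipflat_eq_ilv : ∀ (a b : List Int),
    (a.zip b).flatMap (fun xy => [xy.1, xy.2]) ++ a.drop b.length = ilv a b := by
  intro a
  induction a with
  | nil => intro b; cases b <;> simp [ilv]
  | cons x a ih =>
    intro b
    cases b with
    | nil => simp [ilv]
    | cons y b =>
      simp only [List.zip_cons_cons, List.flatMap_cons, List.length_cons,
        List.drop_succ_cons, ilv, List.cons_append, List.nil_append]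
      rw [← ih b]

theorem ilv_length : ∀ {a b : List Int}, b.length ≤ a.length →
    (ilv a b).length = a.length + b.length := by
  intro a
  induction a with
  | nil => intro b h; cases b <;> simp_all [ilv]
  | cons x a ih =>
    intro b h
    cases b with
    | nil => simp [ilv]
    | cons y b => simp_all [ilv]; omega

theorem ilv_getD : ∀ {a b : List Int}, b.length ≤ a.length → a.length ≤ b.length + 1 →
    ∀ {k : Nat}, k < a.length + b.length →
      (ilv a b).getD k 0 = if k % 2 = 0 then a.getD (k / 2) 0 else b.getD (k / 2) 0 := by
  intro a
  induction a with
  | nil => intro b h _ k hk; simp at h; subst h; simp at hk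
  | cons x a ih =>
    intro b hba hab k hk
    cases b with
    | nil =>
      simp only [List.length_cons, List.length_nil] at hab hk
      have ha : a = [] := List.eq_nil_of_length_eq_zero (by omega)
      subst ha
      have : k = 0 := by omega
      subst this
      simp [ilv]
    | cons y b =>
      match k with
      | 0 => simp [ilv]
      | 1 => simp [ilv]
      | (k + 2) =>
        simp only [ilv, List.getD_cons_succ]
        have h2 : (k + 2) % 2 = k % 2 := by omega
        have h3 : (k + 2) / 2 = k / 2 + 1 := by omega
        rw [h2, h3]
        simp only [List.getD_cons_succ]
        apply ih (by simpa using hba) (by simp at hab ⊢; omega)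
        simp at hk ⊢; omega

theorem interleaveB_eq_ilv : ∀ (a b : List Int), interleaveB a b = ilv a b := by
  intro a b
  unfold interleaveB
  rw [PySem.List.foldl_append_eq_flatMap (fun xy => [xy.1, xy.2]) (a.zip b) []]
  simpa using zipflat_eq_ilv a b

theorem range_map_getD (xs : List Int) (d : Int) : ∀ {k : Nat}, k ≤ xs.length →
    (List.range k).map (fun i => xs.getD i d) = xs.take k := by
  intro k
  induction k with
  | zero => simp
  | succ k ih =>
    intro h
    rw [List.range_succ, List.map_append, ih (by omega), List.take_add_one]
    have : xs[k]? = some (xs.getD k d) := by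
      rw [List.getElem?_eq_getElem (by omega)]
      simp [List.getD_eq_getElem?_getD, List.getElem?_eq_getElem (show k < xs.length by omega)]
    rw [this]
    simp only [Option.toList_some, List.map_cons, List.map_nil]

theorem product_eq_ilv (a b : List Int) (hba : b.length ≤ a.length)
    (hab : a.length ≤ b.length + 1) : product a b = ilv a b := by
  have key : ∀ k, k ≤ a.length + b.length →
      (List.range k).foldl
        (fun (st : Nat × Nat × List Int) i =>
          if i % 2 == 0 then (st.1 + 1, st.2.1, st.2.2 ++ [a.getD st.1 0])
          else (st.1, st.2.1 + 1, st.2.2 ++ [b.getD st.2.1 0]))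
        (0, 0, ([] : List Int)) = ((k + 1) / 2, k / 2, (ilv a b).take k) := by
    intro k
    induction k with
    | zero => intro _; norm_num
    | succ k ih =>
      intro hk
      rw [List.range_succ, List.foldl_append, ih (by omega)]
      have hilvlen : (ilv a b).length = a.length + b.length := ilv_length hba
      have htake : (ilv a b).take (k + 1) = (ilv a b).take k ++ [(ilv a b).getD k 0] := by
        rw [List.take_add_one]
        have : (ilv a b)[k]? = some ((ilv a b).getD k 0) := by
          rw [List.getElem?_eq_getElem (by omega)]
          simp [List.getD_eq_getElem?_getD, List.getElem?_eq_getElem (show k < (ilv a b).length by omega)]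
        rw [this]
        simp only [Option.toList_some]
      by_cases hpar : k % 2 = 0
      · have : (k % 2 == 0) = true := by simpa using hpar
        simp only [List.foldl_cons, List.foldl_nil, this]
        simp only [ilv_getD hba hab (show k < a.length + b.length by omega), hpar] at htake
        rw [htake]
        have e1 : (k + 1 + 1) / 2 = (k + 1) / 2 + 1 := by omega
        have e2 : (k + 1) / 2 = k / 2 := by omega
        simp [e1, e2]
      · have hb : (k % 2 == 0) = false := by simpa using hpar
        simp only [List.foldl_cons, List.foldl_nil, hb, Bool.false_eq_true, if_false]
        simp only [ilv_getD hba hab (show k < a.length + b.length by omega), hpar] at htake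
        rw [htake]
        have e1 : (k + 1 + 1) / 2 = (k + 1) / 2 := by omega
        have e2 : (k + 1) / 2 = k / 2 + 1 := by omega
        simp [e1, e2]
  have hdef : product a b = ((List.range (a.length + b.length)).foldl
      (fun (st : Nat × Nat × List Int) i =>
        if i % 2 == 0 then (st.1 + 1, st.2.1, st.2.2 ++ [a.getD st.1 0])
        else (st.1, st.2.1 + 1, st.2.2 ++ [b.getD st.2.1 0]))
      (0, 0, ([] : List Int))).2.2 := rfl
  rw [hdef, key (a.length + b.length) le_rfl]
  show (ilv a b).take (a.length + b.length) = ilv a b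
  rw [← ilv_length hba, List.take_length]

def oddOne (c : List Int) : List Int :=
  ilv (c.take (c.length / 2 + 1)) (c.drop (c.length / 2 + 1))

theorem second_loop (c : List Int) (middle : Nat) : ∀ (cnt : Nat),
    (List.range cnt).foldl
        (fun (st : List Int × Nat) _ => (st.1 ++ [c.getD (st.2 + 1) 0], st.2 + 1))
        ([], middle)
      = ((List.range cnt).map (fun t => c.getD (middle + 1 + t) 0), middle + cnt) := by
  intro cnt
  induction cnt with
  | zero => simp
  | succ k ih =>
    rw [List.range_succ, List.foldl_append, ih]
    simp [List.map_append, Nat.add_assoc, Nat.add_comm, Nat.add_left_comm]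

theorem oddComp_eq_map (cs : List (List Int)) (h : ∀ c ∈ cs, c.length % 2 = 1) :
    oddCycleComposition cs = cs.map oddOne := by
  unfold oddCycleComposition
  rw [PySem.List.foldl_append_singleton_eq_map
    (fun cycle => product
      ((List.range (cycle.length / 2 + 1)).foldl (fun f i => f ++ [cycle.getD i 0]) [])
      (((List.range (cycle.length - cycle.length / 2 - 1)).foldl
          (fun (st : List Int × Nat) _ => (st.1 ++ [cycle.getD (st.2 + 1) 0], st.2 + 1))
          ([], cycle.length / 2)).1) ) cs []]
  rw [List.nil_append]
  apply List.map_congr_left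
  intro c hc
  have hodd := h c hc
  have hn : 0 < c.length := by omega
  have hmid : c.length / 2 + 1 ≤ c.length := by omega
  -- first loop = take
  rw [PySem.List.foldl_append_singleton_eq_map (fun i => c.getD i 0) _ [],
      List.nil_append, range_map_getD c 0 hmid, second_loop]
  -- second = drop
  have hdropgetD : ∀ t, c.getD (c.length / 2 + 1 + t) 0 = (c.drop (c.length / 2 + 1)).getD t 0 := by
    intro t
    simp [List.getD_eq_getElem?_getD, List.getElem?_drop]
  have hcnt : c.length - c.length / 2 - 1 = (c.drop (c.length / 2 + 1)).length := by
    simp; omega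
  simp only [hdropgetD]
  rw [hcnt, range_map_getD (c.drop (c.length / 2 + 1)) 0 le_rfl, List.take_length]
  unfold oddOne
  apply product_eq_ilv
  · simp; omega
  · simp; omega

theorem separate_go : ∀ (cl : List (List Int)) (e o : List (List Int)),
    cl.foldl
      (fun (st : List (List Int) × List (List Int)) cycle =>
        if cycle.length % 2 == 0 then (st.1 ++ [cycle], st.2) else (st.1, st.2 ++ [cycle]))
      (e, o)
    = (e ++ cl.filter (fun c => c.length % 2 == 0), o ++ cl.filter (fun c => !(c.length % 2 == 0))) := by
  intro cl
  induction cl with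
  | nil => simp
  | cons c cl ih =>
    intro e o
    cases h : (c.length % 2 == 0) with
    | true =>
      simp only [List.foldl_cons, List.filter_cons, h, Bool.not_true, if_true,
        Bool.false_eq_true, if_false]
      rw [ih]
      simp
    | false =>
      simp only [List.foldl_cons, List.filter_cons, h, Bool.not_false, if_true,
        Bool.false_eq_true, if_false]
      rw [ih]
      simp

theorem separate_eq (cl : List (List Int)) :
    separateOddEven cl =
      (cl.filter (fun c => c.length % 2 == 0), cl.filter (fun c => !(c.length % 2 == 0))) := by
  unfold separateOddEven
  rw [separate_go]
  simp

theorem extractA_decomp {L : Nat} : ∀ {cs : List (List Int)} {m rest},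
    extractA L cs = some (m, rest) →
    ∃ pre post, cs = pre ++ m :: post ∧ rest = pre ++ post ∧
      (∀ c ∈ pre, c.length ≠ L) ∧ m.length = L := by
  intro cs
  induction cs with
  | nil => intro m rest h; simp [extractA] at h
  | cons c cs ih =>
    intro m rest h
    simp only [extractA] at h
    split at h
    · rename_i hbeq
      cases h
      exact ⟨[], cs, by simp, by simp, by simp, by simpa using hbeq⟩
    · rename_i hbeq
      cases hx : extractA L cs with
      | none => rw [hx] at h; cases h
      | some p =>
        obtain ⟨m', rest'⟩ := p
        rw [hx] at h
        cases h
        obtain ⟨pre, post, h1, h2, h3, h4⟩ := ih hx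
        exact ⟨c :: pre, post, by simp [h1], by simp [h2],
          by intro d hd
             rcases List.mem_cons.mp hd with h | h
             · subst h; simpa using hbeq
             · exact h3 d h, h4⟩

theorem extractA_isSome {L : Nat} : ∀ {cs : List (List Int)} {m : List Int},
    m ∈ cs → m.length = L → (extractA L cs).isSome := by
  intro cs
  induction cs with
  | nil => intro m h; simp at h
  | cons c cs ih =>
    intro m hm hL
    simp only [extractA]
    split
    · simp
    · rename_i hbeq
      rcases List.mem_cons.mp hm with h | h
      · subst h; simp [hL] at hbeq
      · have := ih h hL
        cases hx : extractA L cs with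
        | none => rw [hx] at this; simp at this
        | some p => simp

def specE : List (List Int) → List (List Int)
  | [] => []
  | c :: rest =>
    match h : extractA c.length rest with
    | some (m, rest') => ilv c m :: specE rest'
    | none => specE rest
termination_by cs => cs.length
decreasing_by
  · have := extractA_length h; simp; omega
  · simp

theorem evenGo_cons_some {c m : List Int} {rest rest' : List (List Int)}
    (h : extractA c.length rest = some (m, rest')) (ans : List (List Int)) :
    evenGo (c :: rest) ans = evenGo rest' (ans ++ [product c m]) := by
  rw [evenGo]
  split
  · rename_i m2 rest2 heq
    rw [h] at heq
    injection heq with heq2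
    injection heq2 with e1 e2
    subst e1; subst e2; rfl
  · rename_i heq
    rw [h] at heq
    cases heq

theorem specE_cons_some {c m : List Int} {rest rest' : List (List Int)}
    (h : extractA c.length rest = some (m, rest')) :
    specE (c :: rest) = ilv c m :: specE rest' := by
  rw [specE]
  split
  · rename_i m2 rest2 heq
    rw [h] at heq
    injection heq with heq2
    injection heq2 with e1 e2
    subst e1; subst e2; rfl
  · rename_i heq
    rw [h] at heq
    cases heq

theorem specE_cons_none {c : List Int} {rest : List (List Int)}
    (h : extractA c.length rest = none) :
    specE (c :: rest) = specE rest := by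
  rw [specE]
  split
  · rename_i m2 rest2 heq
    rw [h] at heq
    cases heq
  · rfl

def PreE (es : List (List Int)) : Prop :=
  ∀ c ∈ es, (es.countP (fun d => d.length == c.length)) % 2 = 0

theorem evenGo_eq_specE : ∀ (es ans : List (List Int)), PreE es →
    evenGo es ans = ans ++ specE es := by
  intro es
  induction es using specE.induct with
  | case1 => intro ans _; simp [evenGo, specE]
  | case2 c rest m rest' h ih =>
    intro ans hpre
    rw [evenGo_cons_some h, specE_cons_some h]
    obtain ⟨pre, post, hcs, hrest, hnoL, hmL⟩ := extractA_decomp h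
    have hperm : rest.Perm (m :: rest') := by
      rw [hcs, hrest]; exact List.perm_middle
    have hpre' : PreE rest' := by
      intro d hd
      have hdm : d ∈ c :: rest :=
        List.mem_cons_of_mem c (hperm.mem_iff.mpr (List.mem_cons_of_mem m hd))
      have h0 := hpre d hdm
      have hc1 := List.countP_cons (p := fun x => x.length == d.length) (a := c) (l := rest)
      have hc2 := hperm.countP_eq (p := fun x => x.length == d.length)
      have hc3 := List.countP_cons (p := fun x => x.length == d.length) (a := m) (l := rest')
      have hPc : (c.length == d.length) = (m.length == d.length) := by rw [hmL]
      by_cases hx : (c.length == d.length) = true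
      · rw [hx] at hc1; rw [hPc] at hx; rw [hx] at hc3
        simp only [if_true] at hc1 hc3
        omega
      · rw [Bool.not_eq_true] at hx
        rw [hx] at hc1; rw [hPc] at hx; rw [hx] at hc3
        simp only [Bool.false_eq_true, if_false] at hc1 hc3
        omega
    rw [ih _ hpre', product_eq_ilv c m (le_of_eq hmL) (by omega)]
    simp
  | case3 c rest h ih =>
    intro ans hpre
    exfalso
    have h0 := hpre c List.mem_cons_self
    have hc1 := List.countP_cons (p := fun x => x.length == c.length) (a := c) (l := rest)
    simp only [beq_self_eq_true, if_true] at hc1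
    have hpos : 0 < rest.countP (fun x => x.length == c.length) := by omega
    obtain ⟨a, ha, hap⟩ := List.countP_pos_iff.mp hpos
    have := extractA_isSome ha (beq_iff_eq.mp hap)
    rw [h] at this
    simp at this

def stepE (st : List (List Int × Option (List Int)) × PySem.Dict Int Nat)
    (c : List Int) : List (List Int × Option (List Int)) × PySem.Dict Int Nat :=
  match st.2.get? (c.length : Int) with
  | some i => (st.1.modify i (fun s => (s.1, some c)), st.2.erase (c.length : Int))
  | none => (st.1 ++ [(c, none)], st.2.insert (c.length : Int) st.1.length)

def finE (sl : List (List Int × Option (List Int))) : List (List Int) :=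
  sl.filterMap (fun s => s.2.map (fun b => ilv s.1 b))

def inc1 (l : List (Int × Nat)) : List (Int × Nat) := l.map (fun p => (p.1, p.2 + 1))

theorem get?_mk_inc1 (l : List (Int × Nat)) (k : Int) :
    (PySem.Dict.mk (inc1 l)).get? k = ((PySem.Dict.mk l).get? k).map (· + 1) := by
  simp only [PySem.Dict.get?, inc1, List.find?_map, Option.map_map]
  rfl

theorem erase_mk_inc1 (l : List (Int × Nat)) (k : Int) :
    (PySem.Dict.mk (inc1 l)).erase k = PySem.Dict.mk (inc1 ((PySem.Dict.mk l).erase k).items) := by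
  simp only [PySem.Dict.erase, inc1, List.filter_map]
  rfl

theorem contains_mk_false {l : List (Int × Nat)} {k : Int}
    (hg : (PySem.Dict.mk l).get? k = none) : (PySem.Dict.mk l).contains k = false := by
  rw [PySem.Dict.contains_eq_isSome_get?, hg]
  rfl

theorem insert_not_contains {d : PySem.Dict Int Nat} {k : Int} (v : Nat)
    (h : d.contains k = false) : d.insert k v = PySem.Dict.mk (d.items ++ [(k, v)]) := by
  simp [PySem.Dict.insert, h]

theorem foldE_shift : ∀ (es : List (List Int)) (done : List Int × Option (List Int))
    (sl : List (List Int × Option (List Int))) (l : List (Int × Nat)),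
    es.foldl stepE (done :: sl, PySem.Dict.mk (inc1 l)) =
      (done :: (es.foldl stepE (sl, PySem.Dict.mk l)).1,
       PySem.Dict.mk (inc1 (es.foldl stepE (sl, PySem.Dict.mk l)).2.items)) := by
  intro es
  induction es with
  | nil => intro done sl l; rfl
  | cons c es ih =>
    intro done sl l
    rw [List.foldl_cons, List.foldl_cons]
    cases hg : (PySem.Dict.mk l).get? (c.length : Int) with
    | some i =>
      have e1 : stepE (sl, PySem.Dict.mk l) c
          = (sl.modify i (fun s => (s.1, some c)), (PySem.Dict.mk l).erase (c.length : Int)) := by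
        unfold stepE; rw [hg]
      have e2 : stepE (done :: sl, PySem.Dict.mk (inc1 l)) c
          = (done :: sl.modify i (fun s => (s.1, some c)),
             PySem.Dict.mk (inc1 ((PySem.Dict.mk l).erase (c.length : Int)).items)) := by
        unfold stepE; rw [get?_mk_inc1, hg]
        show ((done :: sl).modify (i + 1) (fun s => (s.1, some c)),
          (PySem.Dict.mk (inc1 l)).erase (c.length : Int)) = _
        rw [List.modify_succ_cons, erase_mk_inc1]
      rw [e1, e2]
      have heta : PySem.Dict.mk ((PySem.Dict.mk l).erase (c.length : Int)).items
          = (PySem.Dict.mk l).erase (c.length : Int) := rfl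
      rw [ih done (sl.modify i (fun s => (s.1, some c))) ((PySem.Dict.mk l).erase (c.length : Int)).items, heta]
    | none =>
      have hc1 : (PySem.Dict.mk l).contains (c.length : Int) = false := contains_mk_false hg
      have hc2 : (PySem.Dict.mk (inc1 l)).contains (c.length : Int) = false := by
        rw [PySem.Dict.contains_eq_isSome_get?, get?_mk_inc1, hg]; rfl
      have e1 : stepE (sl, PySem.Dict.mk l) c
          = (sl ++ [(c, none)], PySem.Dict.mk (l ++ [((c.length : Int), sl.length)])) := by
        unfold stepE; rw [hg]
        show (sl ++ [(c, none)], (PySem.Dict.mk l).insert (c.length : Int) sl.length) = _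
        rw [insert_not_contains _ hc1]
      have e2 : stepE (done :: sl, PySem.Dict.mk (inc1 l)) c
          = (done :: (sl ++ [(c, none)]),
             PySem.Dict.mk (inc1 (l ++ [((c.length : Int), sl.length)]))) := by
        unfold stepE; rw [get?_mk_inc1, hg]
        show ((done :: sl) ++ [(c, none)],
          (PySem.Dict.mk (inc1 l)).insert (c.length : Int) (done :: sl).length) = _
        rw [insert_not_contains _ hc2]
        simp [inc1]
      rw [e1, e2]
      exact ih done (sl ++ [(c, none)]) (l ++ [((c.length : Int), sl.length)])

theorem get?_mk_cons_ne {t : List (Int × Nat)} {L k : Int} {v : Nat} (h : (L == k) = false) :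
    (PySem.Dict.mk ((L, v) :: t)).get? k = (PySem.Dict.mk t).get? k := by
  rw [PySem.Dict.get?_mk_cons, h]
  simp

theorem foldE_pend : ∀ (es : List (List Int)) (c0 : List Int)
    (sl : List (List Int × Option (List Int))) (l : List (Int × Nat)) (L : Int),
    (∀ c ∈ es, (c.length : Int) ≠ L) →
    es.foldl stepE ((c0, none) :: sl, PySem.Dict.mk ((L, 0) :: inc1 l)) =
      ((c0, none) :: (es.foldl stepE (sl, PySem.Dict.mk l)).1,
       PySem.Dict.mk ((L, 0) :: inc1 (es.foldl stepE (sl, PySem.Dict.mk l)).2.items)) := by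
  intro es
  induction es with
  | nil => intro c0 sl l L _; rfl
  | cons c es ih =>
    intro c0 sl l L hne
    have hLc : (L == (c.length : Int)) = false := by
      have := hne c (List.mem_cons_self)
      simp
      omega
    rw [List.foldl_cons, List.foldl_cons]
    cases hg : (PySem.Dict.mk l).get? (c.length : Int) with
    | some i =>
      have e1 : stepE (sl, PySem.Dict.mk l) c
          = (sl.modify i (fun s => (s.1, some c)), (PySem.Dict.mk l).erase (c.length : Int)) := by
        unfold stepE; rw [hg]
      have e2 : stepE ((c0, none) :: sl, PySem.Dict.mk ((L, 0) :: inc1 l)) c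
          = ((c0, none) :: sl.modify i (fun s => (s.1, some c)),
             PySem.Dict.mk ((L, 0) :: inc1 ((PySem.Dict.mk l).erase (c.length : Int)).items)) := by
        unfold stepE
        rw [get?_mk_cons_ne hLc, get?_mk_inc1, hg]
        show (((c0, none) :: sl).modify (i + 1) (fun s => (s.1, some c)),
          (PySem.Dict.mk ((L, 0) :: inc1 l)).erase (c.length : Int)) = _
        rw [List.modify_succ_cons]
        have herase : (PySem.Dict.mk ((L, 0) :: inc1 l)).erase (c.length : Int)
            = PySem.Dict.mk ((L, 0) :: inc1 ((PySem.Dict.mk l).erase (c.length : Int)).items) := by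
          simp only [PySem.Dict.erase, List.filter_cons]
          rw [show (!L == (c.length : Int)) = true by rw [hLc]; rfl]
          have := erase_mk_inc1 l (c.length : Int)
          simp only [PySem.Dict.erase] at this
          simp only [PySem.Dict.mk.injEq] at this ⊢
          rw [this]
          simp
        rw [herase]
      rw [e1, e2]
      have heta : PySem.Dict.mk ((PySem.Dict.mk l).erase (c.length : Int)).items
          = (PySem.Dict.mk l).erase (c.length : Int) := rfl
      rw [ih c0 (sl.modify i (fun s => (s.1, some c)))
            ((PySem.Dict.mk l).erase (c.length : Int)).items L
            (fun d hd => hne d (List.mem_cons_of_mem c hd)), heta]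
    | none =>
      have hc1 : (PySem.Dict.mk l).contains (c.length : Int) = false := contains_mk_false hg
      have hc2 : (PySem.Dict.mk ((L, 0) :: inc1 l)).contains (c.length : Int) = false := by
        rw [PySem.Dict.contains_eq_isSome_get?, get?_mk_cons_ne hLc, get?_mk_inc1, hg]; rfl
      have e1 : stepE (sl, PySem.Dict.mk l) c
          = (sl ++ [(c, none)], PySem.Dict.mk (l ++ [((c.length : Int), sl.length)])) := by
        unfold stepE; rw [hg]
        show (sl ++ [(c, none)], (PySem.Dict.mk l).insert (c.length : Int) sl.length) = _
        rw [insert_not_contains _ hc1]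
      have e2 : stepE ((c0, none) :: sl, PySem.Dict.mk ((L, 0) :: inc1 l)) c
          = ((c0, none) :: (sl ++ [(c, none)]),
             PySem.Dict.mk ((L, 0) :: inc1 (l ++ [((c.length : Int), sl.length)]))) := by
        unfold stepE
        rw [get?_mk_cons_ne hLc, get?_mk_inc1, hg]
        show (((c0, none) :: sl) ++ [(c, none)],
          (PySem.Dict.mk ((L, 0) :: inc1 l)).insert (c.length : Int) ((c0, none) :: sl).length) = _
        rw [insert_not_contains _ hc2]
        simp [inc1]
      rw [e1, e2]
      exact ih c0 (sl ++ [(c, none)]) (l ++ [((c.length : Int), sl.length)]) L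
        (fun d hd => hne d (List.mem_cons_of_mem c hd))

theorem foldE_keys : ∀ (es : List (List Int)) (sl : List (List Int × Option (List Int)))
    (l : List (Int × Nat)) (p : Int × Nat),
    p ∈ (es.foldl stepE (sl, PySem.Dict.mk l)).2.items →
    p.1 ∈ l.map Prod.fst ∨ ∃ c ∈ es, p.1 = (c.length : Int) := by
  intro es
  induction es with
  | nil =>
    intro sl l p hp
    left
    exact List.mem_map_of_mem hp
  | cons c es ih =>
    intro sl l p hp
    rw [List.foldl_cons] at hp
    cases hg : (PySem.Dict.mk l).get? (c.length : Int) with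
    | some i =>
      have e1 : stepE (sl, PySem.Dict.mk l) c
          = (sl.modify i (fun s => (s.1, some c)), (PySem.Dict.mk l).erase (c.length : Int)) := by
        unfold stepE; rw [hg]
      rw [e1] at hp
      have heta : (PySem.Dict.mk l).erase (c.length : Int)
          = PySem.Dict.mk (((PySem.Dict.mk l).erase (c.length : Int)).items) := rfl
      rw [heta] at hp
      rcases ih _ _ _ hp with h | h
      · left
        simp only [PySem.Dict.erase] at h
        rcases List.mem_map.mp h with ⟨q, hq, hq2⟩
        exact hq2 ▸ List.mem_map_of_mem (List.mem_of_mem_filter hq)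
      · right
        obtain ⟨d, hd, he⟩ := h
        exact ⟨d, List.mem_cons_of_mem c hd, he⟩
    | none =>
      have e1 : stepE (sl, PySem.Dict.mk l) c
          = (sl ++ [(c, none)], PySem.Dict.mk (l ++ [((c.length : Int), sl.length)])) := by
        unfold stepE; rw [hg]
        show (sl ++ [(c, none)], (PySem.Dict.mk l).insert (c.length : Int) sl.length) = _
        rw [insert_not_contains _ (contains_mk_false hg)]
      rw [e1] at hp
      rcases ih _ _ _ hp with h | h
      · rw [List.map_append] at h
        rcases List.mem_append.mp h with h | h
        · exact Or.inl h
        · right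
          exact ⟨c, List.mem_cons_self, by simpa using h⟩
      · right
        obtain ⟨d, hd, he⟩ := h
        exact ⟨d, List.mem_cons_of_mem c hd, he⟩

theorem foldE_spec : ∀ (es : List (List Int)),
    finE ((es.foldl stepE ([], PySem.Dict.mk [])).1) = specE es := by
  intro es
  induction es using specE.induct with
  | case1 => simp [finE, specE]
  | case2 c rest m rest' h ih =>
    rw [specE_cons_some h]
    obtain ⟨pre, post, hcs, hrest, hnoL, hmL⟩ := extractA_decomp h
    rw [List.foldl_cons]
    have e0 : stepE (([] : List (List Int × Option (List Int))), PySem.Dict.mk []) c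
        = ([(c, none)], PySem.Dict.mk [((c.length : Int), 0)]) := rfl
    rw [e0, hcs, List.foldl_append, List.foldl_cons]
    have hpend := foldE_pend pre c [] [] (c.length : Int)
      (fun d hd => by
        have := hnoL d hd
        exact_mod_cast fun hc => this (by exact_mod_cast hc))
    rw [show (inc1 [] : List (Int × Nat)) = [] from rfl] at hpend
    rw [hpend]
    set r1 := pre.foldl stepE (([] : List (List Int × Option (List Int))), PySem.Dict.mk []) with hr1
    -- step at the partner m
    have hkeys : ∀ p ∈ inc1 r1.2.items, (!(p.1 == (c.length : Int))) = true := by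
      intro p hp
      rcases List.mem_map.mp hp with ⟨q, hq, hq2⟩
      rcases foldE_keys pre [] [] q hq with h' | h' 
      · simp at h'
      · obtain ⟨d, hd, he⟩ := h'
        have : d.length ≠ c.length := hnoL d hd
        subst hq2
        simp only [Bool.not_eq_eq_eq_not, Bool.not_true, beq_eq_false_iff_ne, ne_eq]
        rw [he]
        exact_mod_cast fun hc => this (by exact_mod_cast hc)
    have em : stepE ((c, none) :: r1.1, PySem.Dict.mk (((c.length : Int), 0) :: inc1 r1.2.items)) m
        = ((c, some m) :: r1.1, PySem.Dict.mk (inc1 r1.2.items)) := by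
      unfold stepE
      have hget : (PySem.Dict.mk (((c.length : Int), 0) :: inc1 r1.2.items)).get? ((m.length : Int))
          = some 0 := by
        rw [PySem.Dict.get?_mk_cons, show ((c.length : Int) == (m.length : Int)) = true by
          rw [hmL]; exact beq_self_eq_true _]
        simp
      rw [hget]
      show (((c, none) :: r1.1).modify 0 (fun s => (s.1, some m)),
        (PySem.Dict.mk (((c.length : Int), 0) :: inc1 r1.2.items)).erase ((m.length : Int))) = _
      rw [List.modify_zero_cons]
      have herase : (PySem.Dict.mk (((c.length : Int), 0) :: inc1 r1.2.items)).erase ((m.length : Int))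
          = PySem.Dict.mk (inc1 r1.2.items) := by
        simp only [PySem.Dict.erase, List.filter_cons, PySem.Dict.mk.injEq]
        rw [show (!(c.length : Int) == (m.length : Int)) = false by
          rw [hmL]; simp]
        simp only [Bool.false_eq_true, if_false]
        rw [hmL, List.filter_eq_self.mpr hkeys]
      rw [herase]
    rw [em]
    rw [foldE_shift post (c, some m) r1.1 r1.2.items]
    have heta2 : (PySem.Dict.mk r1.2.items) = r1.2 := rfl
    rw [heta2]
    have hfold2 : post.foldl stepE (r1.1, r1.2) = rest'.foldl stepE ([], PySem.Dict.mk []) := by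
      rw [hrest, List.foldl_append, hr1]
    rw [hfold2]
    simp only [finE, List.filterMap_cons, Option.map_some]
    rw [← finE, ih]
  | case3 c rest h ih =>
    rw [specE_cons_none h]
    have hnoL : ∀ d ∈ rest, d.length ≠ c.length := by
      intro d hd hc
      have := extractA_isSome hd hc
      rw [h] at this
      simp at this
    rw [List.foldl_cons]
    have e0 : stepE (([] : List (List Int × Option (List Int))), PySem.Dict.mk []) c
        = ([(c, none)], PySem.Dict.mk [((c.length : Int), 0)]) := rfl
    rw [e0]
    have hpend := foldE_pend rest c [] [] (c.length : Int)
      (fun d hd => by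
        have := hnoL d hd
        exact_mod_cast fun hc => this (by exact_mod_cast hc))
    rw [show (inc1 [] : List (Int × Nat)) = [] from rfl] at hpend
    rw [hpend]
    simp only [finE, List.filterMap_cons, Option.map_none]
    rw [← finE, ih]

theorem foldB_split : ∀ (cl : List (List Int)) (od : List (List Int))
    (sl : List (List Int × Option (List Int))) (dd : PySem.Dict Int Nat),
    cl.foldl stepB (od, sl, dd) =
      (od ++ (cl.filter (fun c => c.length % 2 == 1)).map
          (fun c => interleaveB (c.take (c.length / 2 + 1)) (c.drop (c.length / 2 + 1))),
       (cl.filter (fun c => !(c.length % 2 == 1))).foldl stepE (sl, dd)) := by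
  intro cl
  induction cl with
  | nil => intro od sl dd; simp
  | cons c cl ih =>
    intro od sl dd
    rw [List.foldl_cons, List.filter_cons, List.filter_cons]
    cases hodd : (c.length % 2 == 1) with
    | true =>
      have e : stepB (od, sl, dd) c
          = (od ++ [interleaveB (c.take (c.length / 2 + 1)) (c.drop (c.length / 2 + 1))], sl, dd) := by
        simp [stepB, hodd]
      rw [e, ih]
      simp
    | false =>
      have e : stepB (od, sl, dd) c = (od, stepE (sl, dd) c) := by
        simp only [stepB, stepE, hodd, Bool.false_eq_true, if_false]
        cases hg : dd.get? (c.length : Int) <;> simp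
      rw [e, ih]
      simp

theorem main_eq (cl : List (List Int)) (hpre : Pre_theMatrix cl) :
    theMatrix cl = theMatrix_alt cl := by
  have hsep := separate_eq cl
  have hodds : ∀ c ∈ cl.filter (fun c => !(c.length % 2 == 0)), c.length % 2 = 1 := by
    intro c hc
    have := List.of_mem_filter hc
    simp only [Bool.not_eq_eq_eq_not, Bool.not_true, beq_eq_false_iff_ne, ne_eq] at this
    omega
  have hPreE : PreE (cl.filter (fun c => c.length % 2 == 0)) := by
    intro c hc
    have hc2 : c ∈ cl := List.mem_of_mem_filter hc
    have hceven : c.length % 2 = 0 := by simpa using List.of_mem_filter hc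
    have h0 := hpre c hc2 hceven
    rw [← List.countP_eq_length_filter] at h0
    rw [List.countP_filter]
    have : List.countP (fun d => (d.length == c.length) && (d.length % 2 == 0)) cl
        = List.countP (fun d => d.length == c.length) cl := by
      apply List.countP_congr
      intro d _
      constructor
      · intro h; exact (Bool.and_eq_true _ _).mp h |>.1
      · intro h
        have hd : d.length = c.length := by simpa using h
        simp [hd, hceven]
    rw [this]
    exact h0
  -- A side
  have hA : theMatrix cl
      = (cl.filter (fun c => !(c.length % 2 == 0))).map oddOne
        ++ specE (cl.filter (fun c => c.length % 2 == 0)) := by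
    unfold theMatrix
    rw [hsep]
    have hfodd : (if (cl.filter (fun c => !(c.length % 2 == 0))).length != 0
          then oddCycleComposition (cl.filter (fun c => !(c.length % 2 == 0))) else [])
        = (cl.filter (fun c => !(c.length % 2 == 0))).map oddOne := by
      cases hb : ((cl.filter (fun c => !(c.length % 2 == 0))).length != 0) with
      | true =>
        rw [if_pos rfl]
        exact oddComp_eq_map _ hodds
      | false =>
        rw [if_neg (by simp [hb])]
        have : cl.filter (fun c => !(c.length % 2 == 0)) = [] :=
          List.eq_nil_of_length_eq_zero (by simpa using hb)
        rw [this]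
        simp
    have hfeven : (if (cl.filter (fun c => c.length % 2 == 0)).length != 0
          then evenCycleComposition (cl.filter (fun c => c.length % 2 == 0)) else [])
        = specE (cl.filter (fun c => c.length % 2 == 0)) := by
      cases hb : ((cl.filter (fun c => c.length % 2 == 0)).length != 0) with
      | true =>
        rw [if_pos rfl]
        unfold evenCycleComposition
        rw [evenGo_eq_specE _ _ hPreE, List.nil_append]
      | false =>
        rw [if_neg (by simp [hb])]
        have : cl.filter (fun c => c.length % 2 == 0) = [] :=
          List.eq_nil_of_length_eq_zero (by simpa using hb)
        rw [this]
        simp [specE]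
    show (if (cl.filter (fun c => c.length % 2 == 0)).length != 0
          then evenCycleComposition (cl.filter (fun c => c.length % 2 == 0)) else []).foldl
        (fun m i => m ++ [i])
        ((if (cl.filter (fun c => !(c.length % 2 == 0))).length != 0
          then oddCycleComposition (cl.filter (fun c => !(c.length % 2 == 0))) else []).foldl
          (fun m i => m ++ [i]) []) = _
    rw [hfodd, hfeven, PySem.List.foldl_append_singleton, PySem.List.foldl_append_singleton,
      List.nil_append]
  -- B side
  have hf1 : cl.filter (fun c => c.length % 2 == 1) = cl.filter (fun c => !(c.length % 2 == 0)) := by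
    apply List.filter_congr
    intro c _
    rcases Nat.mod_two_eq_zero_or_one c.length with h | h <;> simp [h]
  have hf2 : cl.filter (fun c => !(c.length % 2 == 1)) = cl.filter (fun c => c.length % 2 == 0) := by
    apply List.filter_congr
    intro c _
    rcases Nat.mod_two_eq_zero_or_one c.length with h | h <;> simp [h]
  have hB : theMatrix_alt cl
      = (cl.filter (fun c => !(c.length % 2 == 0))).map oddOne
        ++ specE (cl.filter (fun c => c.length % 2 == 0)) := by
    unfold theMatrix_alt
    rw [show (PySem.Dict.empty : PySem.Dict Int Nat) = PySem.Dict.mk [] from rfl]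
    rw [foldB_split cl [] [] (PySem.Dict.mk []), hf1, hf2]
    simp only [interleaveB_eq_ilv, List.nil_append]
    have hfin : ∀ (sl : List (List Int × Option (List Int))),
        sl.filterMap (fun s => s.2.map (fun b => ilv s.1 b)) = finE sl := fun _ => rfl
    rw [hfin, foldE_spec]
    rfl
  rw [hA, hB]

-- ===== VERDICT (by name: the statement is the Claim_ definition above) =====
theorem theMatrix_spec : Claim_equal_theMatrix := by
  intro cl _ hpre
  unfold Spec_theMatrix
  exact main_eq cl hpre
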